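-- pv_equiv track=rewrite | github.com/yangtzehina/auto-skills-loop | src/openclaw_skill_create/services/workflow_form.py | _section_headings
-- ===== SOURCE A (Python) =====
-- def _section_headings(section_text: str) -> list[str]:
--     headings: list[str] = []
--     in_fence = False
--     for line in str(section_text or "").splitlines():
--         stripped = line.strip()
--         if stripped.startswith("```"):
--             in_fence = not in_fence
--             continue
--         if in_fence or not stripped.startswith("#"):
--             continue
--         heading = stripped.lstrip("#").strip()
--         if heading:
--             headings.append(heading)
--     return headings
-- ===== SOURCE B (Python) =====
-- def _seg_headings(seg):
--     out = []
--     for line in seg: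
--         stripped = line.strip()
--         if stripped.startswith("#"):
--             heading = stripped.lstrip("#").strip()
--             if heading:
--                 out.append(heading)
--     return out
--
--
-- def _section_headings(section_text: str) -> list[str]:
--     # Phase 1: split the lines into segments separated by fence lines
--     # (the fence line itself belongs to no segment).
--     segments = [[]]
--     for line in str(section_text or "").splitlines():
--         if line.strip().startswith("```"):
--             segments.append([])
--         else:
--             segments[-1].append(line)
--     # Phase 2: segments alternate outside/inside fences, starting outside:
--     # only even-indexed segments carry headings.
--     headings = []
--     for i, seg in enumerate(segments):
--         if i % 2 == 0:
--             headings += _seg_headings(seg)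
--     return headings
-- ===== Notes on version B (the rewrite author's own statement) =====
-- stated objective: alternative
-- what changed: Replaces the single flag-toggling line loop by a two-phase decomposition: first split the lines into segments at fence lines, then harvest headings only from even-indexed (outside-fence) segments.
import Mathlib
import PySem

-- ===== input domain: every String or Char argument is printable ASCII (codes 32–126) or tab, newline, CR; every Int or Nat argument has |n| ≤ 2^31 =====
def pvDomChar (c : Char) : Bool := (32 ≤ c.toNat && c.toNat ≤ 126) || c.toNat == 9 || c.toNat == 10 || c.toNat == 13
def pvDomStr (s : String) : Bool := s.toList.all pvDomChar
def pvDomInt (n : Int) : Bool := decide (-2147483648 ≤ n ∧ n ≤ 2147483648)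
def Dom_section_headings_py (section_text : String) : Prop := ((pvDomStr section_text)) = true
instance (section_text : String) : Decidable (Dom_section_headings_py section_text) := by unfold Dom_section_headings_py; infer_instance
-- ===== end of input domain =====

-- B replaces A's single flag-toggling line loop by a two-phase decomposition
-- (split lines into fence-separated segments, then harvest headings from the
-- even-indexed segments); same cost, different structure.


-- ===== PORT A =====
-- s.lstrip('#'): ported by hand as dropWhile (· == '#') — exact, since lstrip with a
-- single-character set removes exactly the leading run of that character.
def pyLstripHash (s : String) : String :=
  String.ofList (s.toList.dropWhile (· == '#'))

def section_headings_py (section_text : String) : List String :=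
  ((PySem.Str.splitlines section_text).foldl
    (fun (st : List String × Bool) line =>
      let stripped := PySem.Str.strip line
      if PySem.Str.startswith stripped "```" then (st.1, !st.2)
      else if st.2 || !(PySem.Str.startswith stripped "#") then st
      else
        let heading := PySem.Str.strip (pyLstripHash stripped)
        if heading ≠ "" then (st.1 ++ [heading], st.2) else st)
    ([], false)).1

-- ===== PORT B =====
def segHeadsB (seg : List String) : List String :=
  seg.foldl
    (fun out line =>
      let stripped := PySem.Str.strip line
      if PySem.Str.startswith stripped "#" then
        let heading := PySem.Str.strip (pyLstripHash stripped)
        if heading ≠ "" then out ++ [heading] else out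
      else out)
    []

def section_headings_py_alt (section_text : String) : List String :=
  let segments := (PySem.Str.splitlines section_text).foldl
    (fun (segs : List (List String)) line =>
      if PySem.Str.startswith (PySem.Str.strip line) "```" then segs ++ [[]]
      else segs.dropLast ++ [segs.getLastD [] ++ [line]])
    [[]]
  (PySem.List.enumerate segments 0).foldl
    (fun headings p => if PySem.Int.mod p.1 2 == 0 then headings ++ segHeadsB p.2 else headings)
    []

-- ===== PRECONDITION & SPEC =====
def Spec_section_headings_py (section_text : String) (out : List String) : Prop := out = section_headings_py_alt section_text
instance (section_text : String) (out : List String) : Decidable (Spec_section_headings_py section_text out) := by unfold Spec_section_headings_py; infer_instance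

-- ===== CLAIM (what is proved, stated in full; the proofs are below) =====
def Claim_equal_section_headings_py : Prop := ∀ (section_text : String), Dom_section_headings_py section_text → Spec_section_headings_py section_text (section_headings_py section_text)

-- ===== LEMMAS AND PROOFS =====

-- what one line contributes when it is outside a fence and not a fence line
def pvExtract (line : String) : List String :=
  let stripped := PySem.Str.strip line
  if PySem.Str.startswith stripped "#" then
    let heading := PySem.Str.strip (pyLstripHash stripped)
    if heading ≠ "" then [heading] else []
  else []

def pvFence (line : String) : Bool :=
  PySem.Str.startswith (PySem.Str.strip line) "```"

-- recursive characterization of A's loop (headings produced from lines, flag b)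
def pvGoA (ls : List String) (b : Bool) : List String :=
  match ls with
  | [] => []
  | l :: ls =>
    if pvFence l then pvGoA ls (!b)
    else if b then pvGoA ls b
    else pvExtract l ++ pvGoA ls b

-- alternating harvest over segments (b = current segment is even-indexed)
def pvQ (segs : List (List String)) (b : Bool) : List String :=
  match segs with
  | [] => []
  | s :: rest => (if b then segHeadsB s else []) ++ pvQ rest (!b)

lemma segHeadsB_eq_foldl (seg : List String) (acc : List String) :
    seg.foldl
      (fun out line =>
        let stripped := PySem.Str.strip line
        if PySem.Str.startswith stripped "#" then
          let heading := PySem.Str.strip (pyLstripHash stripped)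
          if heading ≠ "" then out ++ [heading] else out
        else out)
      acc = acc ++ seg.flatMap pvExtract := by
  induction seg generalizing acc with
  | nil => simp
  | cons l ls ih =>
    simp only [List.foldl_cons, List.flatMap_cons]
    by_cases hs : PySem.Str.startswith (PySem.Str.strip l) "#"
    · by_cases hh : PySem.Str.strip (pyLstripHash (PySem.Str.strip l)) = ""
      · simp only [pvExtract, if_pos hs, hh, ne_eq, not_true_eq_false, if_false, ih]
        simp
      · simp only [pvExtract, if_pos hs, ne_eq, hh, not_false_eq_true, if_true, ih]
        simp
    · simp only [pvExtract, if_neg hs, ih]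
      simp

lemma segHeadsB_flatMap (seg : List String) :
    segHeadsB seg = seg.flatMap pvExtract := by
  unfold segHeadsB
  rw [segHeadsB_eq_foldl, List.nil_append]

lemma segHeadsB_append (s : List String) (l : String) :
    segHeadsB (s ++ [l]) = segHeadsB s ++ pvExtract l := by
  simp [segHeadsB_flatMap]

lemma foldA_eq (ls : List String) (acc : List String) (b : Bool) :
    (ls.foldl
      (fun (st : List String × Bool) line =>
        let stripped := PySem.Str.strip line
        if PySem.Str.startswith stripped "```" then (st.1, !st.2)
        else if st.2 || !(PySem.Str.startswith stripped "#") then st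
        else
          let heading := PySem.Str.strip (pyLstripHash stripped)
          if heading ≠ "" then (st.1 ++ [heading], st.2) else st)
      (acc, b)).1 = acc ++ pvGoA ls b := by
  induction ls generalizing acc b with
  | nil => simp [pvGoA]
  | cons l ls ih =>
    simp only [List.foldl_cons, pvGoA, pvFence, pvExtract]
    by_cases hf : PySem.Str.startswith (PySem.Str.strip l) "```"
    · rw [if_pos hf, if_pos hf, ih]
    · rw [if_neg hf, if_neg hf]
      cases b with
      | true =>
        rw [if_pos (by rw [Bool.true_or]), if_pos rfl, ih]
      | false =>
        by_cases hs : PySem.Str.startswith (PySem.Str.strip l) "#"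
        · rw [if_neg (by rw [Bool.false_or, hs, Bool.not_true]; exact Bool.false_ne_true),
            if_neg (Bool.false_ne_true), if_pos hs]
          by_cases hh : PySem.Str.strip (pyLstripHash (PySem.Str.strip l)) = ""
          · rw [if_neg (by simpa using hh), if_neg (by simpa using hh), ih, List.nil_append]
          · rw [if_pos (by simpa using hh), if_pos (by simpa using hh), ih, List.append_assoc,
              List.singleton_append]
        · rw [if_pos (by rw [Bool.false_or, (Bool.not_eq_true' _).mpr (by simpa using hs)]),
            if_neg (Bool.false_ne_true), if_neg hs, ih, List.nil_append]

lemma pvQ_append_nil (segs : List (List String)) (b : Bool) :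
    pvQ (segs ++ [[]]) b = pvQ segs b := by
  induction segs generalizing b with
  | nil => simp [pvQ, segHeadsB]
  | cons s rest ih => simp [pvQ, ih]

lemma pvQ_updLast (segs : List (List String)) (l : String) (b : Bool) (h : segs ≠ []) :
    pvQ (segs.dropLast ++ [segs.getLastD [] ++ [l]]) b
      = pvQ segs b ++ (if b = (segs.length % 2 == 1) then pvExtract l else []) := by
  induction segs generalizing b with
  | nil => exact absurd rfl h
  | cons s rest ih =>
    cases rest with
    | nil =>
      cases b <;> simp [pvQ, segHeadsB_append]
    | cons t rest' =>
      have hne : (t :: rest') ≠ ([] : List (List String)) := by simp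
      have hstep : (s :: t :: rest').dropLast ++ [(s :: t :: rest').getLastD [] ++ [l]]
          = s :: ((t :: rest').dropLast ++ [(t :: rest').getLastD [] ++ [l]]) := by
        simp
      rw [hstep]
      simp only [pvQ]
      rw [ih (!b) hne, ← List.append_assoc]
      have hpar : (if (!b) = ((t :: rest').length % 2 == 1) then pvExtract l else [])
          = (if b = ((s :: t :: rest').length % 2 == 1) then pvExtract l else []) := by
        rcases Nat.mod_two_eq_zero_or_one rest'.length with h | h <;>
          cases b <;> simp [List.length_cons, Nat.add_mod, h]
      rw [hpar]
      simp only [pvQ, List.append_assoc]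

-- MAIN INVARIANT: processing B's segments equals A's remaining-loop output
lemma main_inv (ls : List String) (segs : List (List String)) (h : segs ≠ []) :
    pvQ (ls.foldl
      (fun (segs : List (List String)) line =>
        if PySem.Str.startswith (PySem.Str.strip line) "```" then segs ++ [[]]
        else segs.dropLast ++ [segs.getLastD [] ++ [line]]) segs) true
      = pvQ segs true ++ pvGoA ls (segs.length % 2 == 0) := by
  induction ls generalizing segs with
  | nil => simp [pvGoA]
  | cons l ls ih =>
    simp only [List.foldl_cons, pvGoA, pvFence]
    by_cases hf : PySem.Str.startswith (PySem.Str.strip l) "```"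
    · rw [if_pos hf, if_pos hf, ih _ (by simp), pvQ_append_nil]
      have : ((segs ++ [[]]).length % 2 == 0) = !(segs.length % 2 == 0) := by
        rcases Nat.mod_two_eq_zero_or_one segs.length with h | h <;>
          simp [List.length_append, Nat.add_mod, h]
      rw [this]
    · rw [if_neg hf, if_neg hf, ih _ (by cases segs <;> simp_all), pvQ_updLast _ _ _ h]
      have hlen : (segs.dropLast ++ [segs.getLastD [] ++ [l]]).length = segs.length := by
        cases segs using List.reverseRecOn <;> simp_all
      rw [hlen]
      by_cases hb : (segs.length % 2 == 0) = true
      · have h0 : segs.length % 2 = 0 := by simpa using hb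
        simp [h0]
      · have h1 : segs.length % 2 = 1 := by
          rcases Nat.mod_two_eq_zero_or_one segs.length with h | h
          · exact absurd (by simp [h]) hb
          · exact h
        simp [h1]

-- B's enumerate-fold equals pvQ (parity of the running index decides harvesting)
lemma enumFold_eq (segs : List (List String)) (s : Int) (acc : List String) :
    (PySem.List.enumerate segs s).foldl
      (fun headings p => if PySem.Int.mod p.1 2 == 0 then headings ++ segHeadsB p.2 else headings)
      acc = acc ++ pvQ segs (PySem.Int.mod s 2 == 0) := by
  induction segs generalizing s acc with
  | nil => simp [PySem.List.enumerate_nil, pvQ]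
  | cons seg rest ih =>
    rw [PySem.List.enumerate_cons]
    simp only [List.foldl_cons, pvQ]
    have hpar : (PySem.Int.mod (s + 1) 2 == 0) = !(PySem.Int.mod s 2 == 0) := by
      have h1 : PySem.Int.mod (s + 1) 2 = (s + 1) % 2 := by
        simp [PySem.Int.mod, Int.fmod_eq_emod]
      have h2 : PySem.Int.mod s 2 = s % 2 := by simp [PySem.Int.mod, Int.fmod_eq_emod]
      rw [h1, h2]
      have ha : s % 2 = 0 ∨ s % 2 = 1 := Int.emod_two_eq s
      have hc : (s + 1) % 2 = 0 ∨ (s + 1) % 2 = 1 := Int.emod_two_eq _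
      rcases ha with h | h <;> rcases hc with h3 | h3 <;> simp [h, h3] <;> omega
    rw [ih, hpar]
    by_cases hm : (PySem.Int.mod s 2 == 0) = true
    · rw [if_pos hm, if_pos hm, List.append_assoc]
    · rw [if_neg hm, if_neg hm, List.nil_append]

-- ===== VERDICT (by name: the statement is the Claim_ definition above) =====
theorem section_headings_py_spec : Claim_equal_section_headings_py := by
  intro t _
  show section_headings_py t = section_headings_py_alt t
  unfold section_headings_py section_headings_py_alt
  rw [foldA_eq, enumFold_eq]
  have h0 : (PySem.Int.mod 0 2 == 0) = true := by decide
  rw [h0, main_inv _ _ (by simp)]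
  simp [pvQ, segHeadsB]
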